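-- pv_equiv track=rewrite | github.com/BenalexCheung/poem-names | gen_names/phonology_analyzer.py | _calculate_rhythm_flow_score
-- ===== SOURCE A (Python) =====
-- def _calculate_rhythm_flow_score(tones):
--     """计算韵律流畅度评分"""
--     if len(tones) < 2:
--         return 30
--
--     flow_score = 0
--
--     # 检查韵律模式
--     patterns = []
--     for i in range(len(tones) - 1):
--         pattern = f"{tones[i]}-{tones[i+1]}"
--         patterns.append(pattern)
--
--     # 奖励有规律的韵律模式
--     common_patterns = {}
--     for pattern in patterns:
--         common_patterns[pattern] = common_patterns.get(pattern, 0) + 1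
--
--     # 如果有重复的韵律模式，加分
--     pattern_variety = len(common_patterns)
--     if pattern_variety <= 2:  # 韵律模式不多样
--         flow_score += 15
--     elif pattern_variety <= 4:
--         flow_score += 10
--     else:  # 韵律过于复杂
--         flow_score += 5
--
--     # 检查是否有过长的相同声调序列
--     for i in range(len(tones) - 2):
--         if tones[i] == tones[i+1] == tones[i+2]:
--             flow_score -= 5  # 三个相同声调减分
--
--     flow_score = max(0, min(30, flow_score + 15))  # 基础15分
--     return flow_score
-- ===== SOURCE B (Python) =====
-- def _calculate_rhythm_flow_score(tones):
--     """Rhythm flow score: set-based pattern variety + run-length triple penalty."""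
--     if len(tones) < 2:
--         return 30
--
--     variety = len({f"{a}-{b}" for a, b in zip(tones, tones[1:])})
--     if variety <= 2:
--         score = 30
--     elif variety <= 4:
--         score = 25
--     else:
--         score = 20
--
--     penalty = 0
--     prev = tones[0]
--     run = 1
--     for cur in tones[1:]:
--         if cur == prev:
--             run += 1
--         else:
--             penalty += 5 * max(0, run - 2)
--             prev = cur
--             run = 1
--     penalty += 5 * max(0, run - 2)
--
--     return max(0, min(30, score - penalty))
-- ===== Notes on version B (the rewrite author's own statement) =====
-- stated objective: alternative
-- what changed: Replaces the dict-counter over a built patterns list with a set comprehension over zip(tones, tones[1:]), and replaces the sliding 3-window triple scan with a single run-length pass subtracting 5*max(0, L-2) per run of equal tones.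
import Mathlib
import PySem

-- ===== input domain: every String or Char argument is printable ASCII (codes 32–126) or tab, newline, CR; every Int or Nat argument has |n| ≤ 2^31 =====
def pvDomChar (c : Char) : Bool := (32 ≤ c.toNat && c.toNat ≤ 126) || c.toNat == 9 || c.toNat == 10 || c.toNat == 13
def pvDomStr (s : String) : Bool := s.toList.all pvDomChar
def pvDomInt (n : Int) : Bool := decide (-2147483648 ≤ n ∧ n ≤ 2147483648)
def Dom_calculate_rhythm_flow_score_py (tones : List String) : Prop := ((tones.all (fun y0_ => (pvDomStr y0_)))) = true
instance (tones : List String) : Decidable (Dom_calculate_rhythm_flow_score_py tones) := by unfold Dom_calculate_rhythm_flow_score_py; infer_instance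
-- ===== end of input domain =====

-- B replaces A's dict-counter/3-window scan by a set of adjacent patterns and a single
-- run-length pass (penalty 5*(L-2) per run); alternative decomposition, same output.


-- ===== PORT A =====
def calculate_rhythm_flow_score_py (tones : List String) : Int :=
  if tones.length < 2 then 30 else
    let flow_score : Int := 0
    -- patterns: f"{tones[i]}-{tones[i+1]}" for i in range(len(tones)-1)
    let patterns : List String :=
      (PySem.List.pyRange 0 ((tones.length : Int) - 1)).foldl
        (fun acc i =>
          acc ++ [PySem.List.pyGetD tones i "" ++ "-" ++ PySem.List.pyGetD tones (i + 1) ""]) []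
    -- common_patterns[pattern] = common_patterns.get(pattern, 0) + 1
    let common_patterns : PySem.Dict String Int :=
      patterns.foldl (fun d p => d.insert p (d.getD p 0 + 1)) (PySem.Dict.mk [])
    let pattern_variety := common_patterns.keys.length
    let flow_score : Int :=
      flow_score + (if pattern_variety ≤ 2 then 15 else if pattern_variety ≤ 4 then 10 else 5)
    -- triple-tone window scan
    let flow_score : Int :=
      (PySem.List.pyRange 0 ((tones.length : Int) - 2)).foldl
        (fun fl i =>
          if PySem.List.pyGetD tones i "" = PySem.List.pyGetD tones (i + 1) "" ∧
             PySem.List.pyGetD tones (i + 1) "" = PySem.List.pyGetD tones (i + 2) ""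
          then fl - 5 else fl) flow_score
    max 0 (min 30 (flow_score + 15))

-- ===== PORT B =====
-- run-length pass of Source B: `prev`/`run` loop, penalty 5*max(0, run-2) at each run end
def pvRunPenalty (ts : List String) (prev : String) (run : Int) : Int :=
  match ts with
  | [] => 5 * max 0 (run - 2)
  | cur :: rest =>
    if cur = prev then pvRunPenalty rest prev (run + 1)
    else 5 * max 0 (run - 2) + pvRunPenalty rest cur 1

def calculate_rhythm_flow_score_py_alt (tones : List String) : Int :=
  match tones with
  | [] => 30
  | [_] => 30
  | a :: rest =>
    let tns := a :: rest
    let variety :=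
      (PySem.Set.ofList ((tns.zip tns.tail).map (fun p => p.1 ++ "-" ++ p.2))).length
    let score : Int := if variety ≤ 2 then 30 else if variety ≤ 4 then 25 else 20
    max 0 (min 30 (score - pvRunPenalty rest a 1))

-- ===== PRECONDITION & SPEC =====
def Spec_calculate_rhythm_flow_score_py (tones : List String) (out : Int) : Prop := out = calculate_rhythm_flow_score_py_alt tones
instance (tones : List String) (out : Int) : Decidable (Spec_calculate_rhythm_flow_score_py tones out) := by unfold Spec_calculate_rhythm_flow_score_py; infer_instance

-- ===== CLAIM (what is proved, stated in full; the proofs are below) =====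
def Claim_equal_calculate_rhythm_flow_score_py : Prop := ∀ (tones : List String), Dom_calculate_rhythm_flow_score_py tones → Spec_calculate_rhythm_flow_score_py tones (calculate_rhythm_flow_score_py tones)

-- ===== LEMMAS AND PROOFS =====

-- structural triple count: number of indices i with tones[i]=tones[i+1]=tones[i+2]
def pvTripCount : List String → Nat
  | a :: b :: c :: rest => (if a = b ∧ b = c then 1 else 0) + pvTripCount (b :: c :: rest)
  | _ => 0

-- A's pattern-index map equals B's zip map (generic index→structural bridge)
theorem pv_map_range_pair {γ : Type} (d : String) (f : String → String → γ) :
    ∀ (l : List String),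
      (List.range (l.length - 1)).map (fun k => f (l.getD k d) (l.getD (k + 1) d)) =
        (l.zip l.tail).map (fun p => f p.1 p.2) := by
  intro l
  induction l with
  | nil => simp
  | cons a l ih =>
    cases l with
    | nil => simp
    | cons b rest =>
      have h : (a :: b :: rest).length - 1 = (b :: rest).length - 1 + 1 := by simp
      rw [h, List.range_succ_eq_map]
      simp only [List.map_cons, List.map_map, List.zip_cons_cons, List.tail_cons]
      simp only [List.tail_cons] at ih
      rw [← ih]
      congr 1

-- keys of Dict.insert = Set.add on keys
theorem pv_keys_insert (d : PySem.Dict String Int) (k : String) (v : Int) :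
    (d.insert k v).keys = PySem.Set.add d.keys k := by
  have hc : d.contains k = PySem.Set.contains (List.map (fun x => x.1) d.items) k := by
    rw [Bool.eq_iff_iff]
    simp only [PySem.Dict.contains, PySem.Set.contains, List.any_eq_true,
      List.contains_iff_mem, List.mem_map, beq_iff_eq]
  simp only [PySem.Dict.insert, PySem.Set.add, PySem.Dict.keys]
  by_cases h : d.contains k = true
  · rw [if_pos h, if_pos (by rw [← hc]; exact h)]
    simp only [List.map_map]
    apply List.map_congr_left
    intro p _
    by_cases hpk : p.1 = k <;> simp [Function.comp, hpk]
  · rw [if_neg h, if_neg (by rw [← hc]; exact h)]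
    simp

-- keys of the counter fold = Set.ofList of the scanned list
theorem pv_keys_counter (xs : List String) :
    ∀ (d : PySem.Dict String Int),
      (xs.foldl (fun d p => d.insert p (d.getD p 0 + 1)) d).keys =
        xs.foldl PySem.Set.add d.keys := by
  induction xs with
  | nil => intro d; rfl
  | cons x xs ih =>
    intro d
    simp only [List.foldl_cons]
    rw [ih, pv_keys_insert]

-- subtracting fold = init - 5 * countP
theorem pv_foldl_sub_if {α : Type} (p : α → Prop) [DecidablePred p] (l : List α) :
    ∀ (s : Int),
      l.foldl (fun fl i => if p i then fl - 5 else fl) s = s - 5 * (l.countP (fun i => decide (p i)) : Int) := by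
  induction l with
  | nil => intro s; simp
  | cons a l ih =>
    intro s
    simp only [List.foldl_cons, List.countP_cons]
    by_cases h : p a <;> simp [h, ih] <;> push_cast <;> ring

-- count of index triples over range = structural pvTripCount
theorem pv_countP_range_trip (d : String) :
    ∀ (l : List String),
      (List.range (l.length - 2)).countP
          (fun k => decide (l.getD k d = l.getD (k + 1) d ∧ l.getD (k + 1) d = l.getD (k + 2) d)) =
        pvTripCount l := by
  intro l
  induction l with
  | nil => simp [pvTripCount]
  | cons a l ih =>
    cases l with
    | nil => simp [pvTripCount]
    | cons b rest =>
      cases rest with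
      | nil => simp [pvTripCount]
      | cons c rest' =>
        have h : (a :: b :: c :: rest').length - 2 = (b :: c :: rest').length - 2 + 1 := by simp
        rw [h, List.range_succ_eq_map, List.countP_cons, List.countP_map]
        have hshift :
            ((fun k => decide ((a :: b :: c :: rest').getD k d = (a :: b :: c :: rest').getD (k + 1) d ∧
                (a :: b :: c :: rest').getD (k + 1) d = (a :: b :: c :: rest').getD (k + 2) d)) ∘ Nat.succ) =
            (fun k => decide ((b :: c :: rest').getD k d = (b :: c :: rest').getD (k + 1) d ∧
                (b :: c :: rest').getD (k + 1) d = (b :: c :: rest').getD (k + 2) d)) := by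
          funext k
          simp [Function.comp, Nat.succ_eq_add_one, List.getD_cons_succ, Nat.add_right_comm]
        rw [hshift, ih]
        simp only [pvTripCount, List.getD_cons_zero, List.getD_cons_succ]
        simp [Nat.add_comm]

theorem pv_trip_ne (prev t : String) (h : prev ≠ t) (rest : List String) :
    pvTripCount (prev :: t :: rest) = pvTripCount (t :: rest) := by
  cases rest with
  | nil => simp [pvTripCount]
  | cons c r => simp [pvTripCount, h]

-- the run-length identity: the pass of Source B computes 5 * (triple count)
theorem pv_runPen_spec :
    ∀ (ts : List String),
      (∀ (prev : String) (k : Nat),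
          pvRunPenalty ts prev ((k : Int) + 2) = 5 * k + 5 * pvTripCount (prev :: prev :: ts)) ∧
      (∀ (a : String), pvRunPenalty ts a 1 = 5 * pvTripCount (a :: ts)) := by
  intro ts
  induction ts with
  | nil =>
    constructor
    · intro prev k; simp [pvRunPenalty, pvTripCount]
    · intro a; simp [pvRunPenalty, pvTripCount]
  | cons t rest ih =>
    obtain ⟨ih1, ih2⟩ := ih
    constructor
    · intro prev k
      by_cases h : t = prev
      · subst h
        simp only [pvRunPenalty, eq_self_iff_true, if_true]
        have hk := ih1 t (k + 1)
        rw [show ((k : Int)) + 2 + 1 = ((k + 1 : Nat) : Int) + 2 by push_cast; ring, hk]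
        simp only [pvTripCount]
        simp only [and_self, eq_self_iff_true, if_true]
        push_cast
        ring

      · simp only [pvRunPenalty, if_neg h]
        rw [ih2 t]
        have h2 : prev ≠ t := fun hh => h hh.symm
        have ht : pvTripCount (prev :: prev :: t :: rest) = pvTripCount (t :: rest) := by
          simp only [pvTripCount]
          rw [pv_trip_ne prev t h2 rest]
          simp [h2]
        rw [ht]
        have hm : max 0 ((k : Int) + 2 - 2) = (k : Int) := by omega
        rw [hm]
    · intro a
      by_cases h : t = a
      · subst h
        simp only [pvRunPenalty, eq_self_iff_true, if_true]
        have hk := ih1 t 0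
        norm_num at hk
        rw [show (1 : Int) + 1 = 2 by norm_num, hk]
      · simp only [pvRunPenalty, if_neg h]
        rw [ih2 t, pv_trip_ne a t (fun hh => h hh.symm) rest]
        norm_num

-- shared abbreviations for the assembly (proof-only helpers)
def pvVariety (l : List String) : Nat :=
  (PySem.Set.ofList ((l.zip l.tail).map (fun p => p.1 ++ "-" ++ p.2))).length

def pvBonus (v : Nat) : Int := if v ≤ 2 then 15 else if v ≤ 4 then 10 else 5

theorem pv_pyGetD_cast1 (xs : List String) (k : Nat) (d : String) :
    PySem.List.pyGetD xs ((k : Int) + 1) d = xs.getD (k + 1) d := by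
  rw [show ((k : Int) + 1) = ((k + 1 : Nat) : Int) by omega]
  exact PySem.List.pyGetD_natCast xs (k + 1) d

theorem pv_pyGetD_cast2 (xs : List String) (k : Nat) (d : String) :
    PySem.List.pyGetD xs ((k : Int) + 2) d = xs.getD (k + 2) d := by
  rw [show ((k : Int) + 2) = ((k + 2 : Nat) : Int) by omega]
  exact PySem.List.pyGetD_natCast xs (k + 2) d

theorem pvA_eq (a b : String) (rest : List String) :
    calculate_rhythm_flow_score_py (a :: b :: rest) =
      max 0 (min 30 (0 + pvBonus (pvVariety (a :: b :: rest))
        - 5 * (pvTripCount (a :: b :: rest) : Int) + 15)) := by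
  rw [calculate_rhythm_flow_score_py]
  rw [if_neg (by simp)]
  simp only []
  -- patterns list → zip map
  rw [PySem.List.foldl_append_singleton_eq_map]
  rw [show (((a :: b :: rest).length : Int) - 1) = (((a :: b :: rest).length - 1 : Nat) : Int) by
        simp [List.length_cons]]
  rw [PySem.List.pyRange_zero_natCast, List.map_map, List.nil_append]
  rw [show ((fun i => PySem.List.pyGetD (a :: b :: rest) i "" ++ "-" ++
          PySem.List.pyGetD (a :: b :: rest) (i + 1) "") ∘ fun k : Nat => (k : Int)) =
        (fun k : Nat => (a :: b :: rest).getD k "" ++ "-" ++ (a :: b :: rest).getD (k + 1) "") by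
      funext k
      simp only [Function.comp, PySem.List.pyGetD_natCast, pv_pyGetD_cast1]]
  rw [pv_map_range_pair "" (fun x y => x ++ "-" ++ y) (a :: b :: rest)]
  -- dict keys → Set.ofList
  rw [pv_keys_counter]
  -- triple fold → countP → pvTripCount
  rw [show (((a :: b :: rest).length : Int) - 2) = (((a :: b :: rest).length - 2 : Nat) : Int) by
        simp [List.length_cons]; omega]
  rw [PySem.List.pyRange_zero_natCast, List.foldl_map]
  rw [show (fun (fl : Int) (k : Nat) =>
        if PySem.List.pyGetD (a :: b :: rest) ((fun k : Nat => (k : Int)) k) "" =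
             PySem.List.pyGetD (a :: b :: rest) ((fun k : Nat => (k : Int)) k + 1) "" ∧
           PySem.List.pyGetD (a :: b :: rest) ((fun k : Nat => (k : Int)) k + 1) "" =
             PySem.List.pyGetD (a :: b :: rest) ((fun k : Nat => (k : Int)) k + 2) ""
        then fl - 5 else fl) =
      (fun (fl : Int) (k : Nat) =>
        if (a :: b :: rest).getD k "" = (a :: b :: rest).getD (k + 1) "" ∧
           (a :: b :: rest).getD (k + 1) "" = (a :: b :: rest).getD (k + 2) ""
        then fl - 5 else fl) by
      funext fl k
      simp only [PySem.List.pyGetD_natCast, pv_pyGetD_cast1, pv_pyGetD_cast2]]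
  rw [pv_foldl_sub_if (fun k : Nat =>
        (a :: b :: rest).getD k "" = (a :: b :: rest).getD (k + 1) "" ∧
        (a :: b :: rest).getD (k + 1) "" = (a :: b :: rest).getD (k + 2) "")]
  rw [pv_countP_range_trip "" (a :: b :: rest)]
  -- fold the abbreviations
  rfl

theorem pvB_eq (a b : String) (rest : List String) :
    calculate_rhythm_flow_score_py_alt (a :: b :: rest) =
      max 0 (min 30 ((if pvVariety (a :: b :: rest) ≤ 2 then (30 : Int)
          else if pvVariety (a :: b :: rest) ≤ 4 then 25 else 20)
        - 5 * (pvTripCount (a :: b :: rest) : Int))) := by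
  have h0 : calculate_rhythm_flow_score_py_alt (a :: b :: rest) =
      max 0 (min 30 ((if pvVariety (a :: b :: rest) ≤ 2 then (30 : Int)
          else if pvVariety (a :: b :: rest) ≤ 4 then 25 else 20)
        - pvRunPenalty (b :: rest) a 1)) := rfl
  rw [h0, (pv_runPen_spec (b :: rest)).2 a]

theorem calculate_rhythm_flow_score_py_spec : Claim_equal_calculate_rhythm_flow_score_py := by
  unfold Claim_equal_calculate_rhythm_flow_score_py Spec_calculate_rhythm_flow_score_py
  intro tones _
  match tones with
  | [] => rfl
  | [_] => rfl
  | a :: b :: rest =>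
    rw [pvA_eq, pvB_eq]
    congr 1
    congr 1
    by_cases h2 : pvVariety (a :: b :: rest) ≤ 2
    · simp [pvBonus, h2]; ring
    · by_cases h4 : pvVariety (a :: b :: rest) ≤ 4
      · simp [pvBonus, h2, h4]; ring
      · simp [pvBonus, h2, h4]; ring
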